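-- pv_equiv track=rewrite | github.com/clodon2/GSU-REU | data_comparison_no_specialty.py | groupify_same_scores
-- ===== SOURCE A (Python) =====
-- def groupify_same_scores(rank_list):
--     """
--     group scores into a list of lists where each sub-list is nodes with the same score
--     doesn't work if scores aren't sorted
--     :param rank_list: a sorted list of tuples [(node, score)]
--     :return: list of lists
--     """
--     if not rank_list:
--         return []
--     grouped_rankings = [[rank_list[0]]]
--     group_index = 0
--     last_score = rank_list[0]
--     for score in rank_list[1:]:
--         # if score still same, add to current group
--         if score[1] == last_score[1]:
--             grouped_rankings[group_index].append(score)
--         else: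
--             grouped_rankings.append([])
--             group_index += 1
--             grouped_rankings[group_index].append(score)
--         last_score = score
--
--     return grouped_rankings
-- ===== SOURCE B (Python) =====
-- def groupify_same_scores(rank_list):
--     n = len(rank_list)
--     if n == 0:
--         return []
--     # stage 1: boundary indices where the score changes
--     bounds = [i for i in range(1, n) if rank_list[i][1] != rank_list[i - 1][1]]
--     # stage 2: slice the list between consecutive boundaries
--     starts = [0] + bounds
--     ends = bounds + [n]
--     return [rank_list[a:b] for a, b in zip(starts, ends)]
-- ===== Notes on version B (the rewrite author's own statement) =====
-- stated objective: alternative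
-- what changed: Replaces the single accumulating loop (current-group index and last-score state) with a staged index-based computation: first collect the boundary indices where the score changes, then slice the list between consecutive boundaries.
import Mathlib
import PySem

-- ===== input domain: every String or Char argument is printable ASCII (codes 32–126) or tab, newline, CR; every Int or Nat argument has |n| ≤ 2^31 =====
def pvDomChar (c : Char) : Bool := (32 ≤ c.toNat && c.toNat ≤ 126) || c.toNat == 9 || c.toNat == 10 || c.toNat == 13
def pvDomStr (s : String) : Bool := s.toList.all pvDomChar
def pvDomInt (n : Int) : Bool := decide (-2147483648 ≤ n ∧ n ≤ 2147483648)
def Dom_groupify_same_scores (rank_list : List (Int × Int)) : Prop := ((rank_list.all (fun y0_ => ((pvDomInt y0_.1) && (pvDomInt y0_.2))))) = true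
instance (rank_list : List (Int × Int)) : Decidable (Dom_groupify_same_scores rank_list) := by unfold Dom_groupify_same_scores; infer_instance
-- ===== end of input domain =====

-- B replaces A's accumulating loop with a staged computation: boundary indices first, then slices between them (alternative decomposition, same cost).


-- ===== PORT A =====
-- A appends to grouped_rankings[group_index], which is always the last group: appendLast models it.
def appendLast (l : List (List (Int × Int))) (s : Int × Int) : List (List (Int × Int)) :=
  match l with
  | [] => []
  | [g] => [g ++ [s]]
  | g :: gs => g :: appendLast gs s

def groupify_same_scores (rank_list : List (Int × Int)) : List (List (Int × Int)) :=
  match rank_list with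
  | [] => []
  | x :: rest =>
    (rest.foldl
      (fun (st : List (List (Int × Int)) × (Int × Int)) s =>
        if s.2 = st.2.2 then (appendLast st.1 s, s)
        else (st.1 ++ [[s]], s))
      ([[x]], x)).1

-- ===== PORT B =====
-- rank_list[i] for i in range(1, n) is always in range: ported as getD; the slice
-- rank_list[a:b] always has 0 ≤ a ≤ b ≤ n here: ported as drop/take (exact on this range).
def groupify_same_scores_alt (rank_list : List (Int × Int)) : List (List (Int × Int)) :=
  let n := rank_list.length
  if n = 0 then []
  else
    let bounds := (List.range' 1 (n - 1)).filter
      (fun i => (rank_list.getD i (0, 0)).2 != (rank_list.getD (i - 1) (0, 0)).2)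
    let starts := 0 :: bounds
    let ends := bounds ++ [n]
    (starts.zip ends).map (fun p => ((rank_list.drop p.1).take (p.2 - p.1)))

-- ===== PRECONDITION & SPEC =====
def Spec_groupify_same_scores (rank_list : List (Int × Int)) (out : List (List (Int × Int))) : Prop := out = groupify_same_scores_alt rank_list
instance (rank_list : List (Int × Int)) (out : List (List (Int × Int))) : Decidable (Spec_groupify_same_scores rank_list out) := by unfold Spec_groupify_same_scores; infer_instance

-- ===== CLAIM (what is proved, stated in full; the proofs are below) =====
def Claim_equal_groupify_same_scores : Prop := ∀ (rank_list : List (Int × Int)), Dom_groupify_same_scores rank_list → Spec_groupify_same_scores rank_list (groupify_same_scores rank_list)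

-- ===== LEMMAS AND PROOFS =====

-- Canonical run-grouping: both ports are proved equal to it.
def spanScore (k : Int) : List (Int × Int) → List (Int × Int) × List (Int × Int)
  | [] => ([], [])
  | x :: xs =>
    if x.2 = k then
      let p := spanScore k xs
      (x :: p.1, p.2)
    else ([], x :: xs)

theorem spanScore_rest_len (k : Int) (xs : List (Int × Int)) :
    (spanScore k xs).2.length ≤ xs.length := by
  induction xs with
  | nil => simp [spanScore]
  | cons x xs ih =>
    simp only [spanScore]
    split
    · simpa using Nat.le_succ_of_le ih
    · simp

def groupRuns : List (Int × Int) → List (List (Int × Int))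
  | [] => []
  | x :: xs =>
    let p := spanScore x.2 xs
    (x :: p.1) :: groupRuns p.2
termination_by l => l.length
decreasing_by
  simpa using Nat.lt_succ_of_le (spanScore_rest_len x.2 xs)

-- ---- A equals groupRuns ----
theorem appendLast_append (pre : List (List (Int × Int))) (cur : List (Int × Int)) (x : Int × Int) :
    appendLast (pre ++ [cur]) x = pre ++ [cur ++ [x]] := by
  induction pre with
  | nil => simp [appendLast]
  | cons p ps ih =>
    cases h : ps ++ [cur] with
    | nil => exact absurd h (by simp)
    | cons q qs =>
      simp only [List.cons_append, h, appendLast]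
      rw [← h, ih]

theorem foldl_inv (xs : List (Int × Int)) (pre : List (List (Int × Int)))
    (cur : List (Int × Int)) (last : Int × Int) :
    (xs.foldl
      (fun (st : List (List (Int × Int)) × (Int × Int)) s =>
        if s.2 = st.2.2 then (appendLast st.1 s, s)
        else (st.1 ++ [[s]], s))
      (pre ++ [cur], last)).1
    = pre ++ (cur ++ (spanScore last.2 xs).1) :: groupRuns (spanScore last.2 xs).2 := by
  induction xs generalizing pre cur last with
  | nil => simp [spanScore, groupRuns]
  | cons x xs ih =>
    simp only [List.foldl_cons, spanScore]
    by_cases h : x.2 = last.2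
    · simp only [h, if_true]
      rw [appendLast_append]
      have hx := ih pre (cur ++ [x]) x
      rw [h] at hx
      rw [hx]
      simp
    · simp only [if_neg h]
      have hx := ih (pre ++ [cur]) [x] x
      rw [hx]
      simp [groupRuns]

theorem A_eq_groupRuns (rl : List (Int × Int)) :
    groupify_same_scores rl = groupRuns rl := by
  cases rl with
  | nil => simp [groupify_same_scores, groupRuns]
  | cons x xs =>
    simp only [groupify_same_scores]
    rw [show ([[x]] : List (List (Int × Int))) = [] ++ [[x]] from rfl, foldl_inv]
    simp [groupRuns]

-- ---- span facts ----
theorem span_append (k : Int) (xs : List (Int × Int)) :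
    (spanScore k xs).1 ++ (spanScore k xs).2 = xs := by
  induction xs with
  | nil => simp [spanScore]
  | cons x xs ih =>
    simp only [spanScore]
    split
    · simpa using ih
    · simp

theorem span_fst (k : Int) (xs : List (Int × Int)) :
    ∀ e ∈ (spanScore k xs).1, e.2 = k := by
  induction xs with
  | nil => simp [spanScore]
  | cons x xs ih =>
    simp only [spanScore]
    split
    · intro e he
      rcases List.mem_cons.1 he with h | h
      · subst h; assumption
      · exact ih e h
    · simp

theorem span_snd (k : Int) (xs : List (Int × Int)) (y : Int × Int) (ys : List (Int × Int))
    (h : (spanScore k xs).2 = y :: ys) : y.2 ≠ k := by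
  induction xs with
  | nil => simp [spanScore] at h
  | cons x xs ih =>
    simp only [spanScore] at h
    split at h
    · exact ih h
    · next hx => cases h; exact hx

-- ---- B equals groupRuns ----
theorem slice_shift (x : Int × Int) (run rest xs : List (Int × Int)) (hx : run ++ rest = xs)
    (S E : List Nat) :
    ((S.map (fun z => (1 + run.length) + z)).zip (E.map (fun z => (1 + run.length) + z))).map
        (fun p => (((x :: xs).drop p.1).take (p.2 - p.1)))
      = (S.zip E).map (fun p => ((rest.drop p.1).take (p.2 - p.1))) := by
  subst hx
  rw [List.zip_map, List.map_map]
  congr 1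
  funext p
  show (((x :: (run ++ rest)).drop ((1 + run.length) + p.1)).take
      (((1 + run.length) + p.2) - ((1 + run.length) + p.1))) = (rest.drop p.1).take (p.2 - p.1)
  have h1 : ((1 + run.length) + p.2) - ((1 + run.length) + p.1) = p.2 - p.1 := by omega
  have h2 : (x :: (run ++ rest)).drop ((1 + run.length) + p.1)
      = rest.drop p.1 := by
    have : (1 + run.length) + p.1 = (run.length + 1) + p.1 := by omega
    rw [this, ← List.drop_drop]
    simp
  rw [h1, h2]

theorem B_eq_groupRuns_bounded : ∀ (N : Nat) (rl : List (Int × Int)), rl.length ≤ N →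
    groupify_same_scores_alt rl = groupRuns rl := by
  intro N
  induction N with
  | zero =>
    intro rl h
    have : rl = [] := List.length_eq_zero_iff.1 (Nat.le_zero.1 h)
    subst this
    simp [groupify_same_scores_alt, groupRuns]
  | succ N ih =>
    intro rl hlen
    cases rl with
    | nil => simp [groupify_same_scores_alt, groupRuns]
    | cons x xs =>
      have hgr : groupRuns (x :: xs)
          = (x :: (spanScore x.2 xs).1) :: groupRuns (spanScore x.2 xs).2 := by
        rw [groupRuns]
      obtain ⟨run, rest, hspan⟩ : ∃ run rest, spanScore x.2 xs = (run, rest) := ⟨_, _, rfl⟩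
      rw [hspan] at hgr
      rw [hgr]
      have hx : run ++ rest = xs := by
        have h := span_append x.2 xs
        rw [hspan] at h
        exact h
      have hidx_run : ∀ i : Nat, i ≤ run.length →
          (((x :: xs).getD i ((0 : Int), (0 : Int))).2) = x.2 := by
        intro i hi
        cases i with
        | zero => rfl
        | succ j =>
          have hj : j < run.length := by omega
          rw [List.getD_cons_succ, ← hx, List.getD_append _ _ _ j (by omega),
            List.getD_eq_getElem _ _ hj]
          have hall := span_fst x.2 xs
          rw [hspan] at hall
          exact hall _ (List.getElem_mem hj)
      have hidx_rest : ∀ j : Nat, (x :: xs).getD (run.length + 1 + j) ((0 : Int), (0 : Int))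
          = rest.getD j ((0 : Int), (0 : Int)) := by
        intro j
        have h1 : run.length + 1 + j = (run.length + j) + 1 := by omega
        rw [h1, List.getD_cons_succ, ← hx, List.getD_append_right _ _ _ _ (by omega)]
        congr 1
        omega
      have hxs : xs.length = run.length + rest.length := by
        rw [← hx]; simp
      simp only [groupify_same_scores_alt, List.length_cons]
      rw [if_neg (Nat.succ_ne_zero _)]
      simp only [Nat.add_sub_cancel]
      rw [hxs]
      have hsplit : List.range' 1 (run.length + rest.length)
          = List.range' 1 run.length ++ List.range' (1 + run.length) rest.length := by
        have h := (List.range'_append (s := 1) (m := run.length) (n := rest.length) (step := 1))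
        rw [← h]
        simp
      rw [hsplit, List.filter_append]
      have hf1 : (List.range' 1 run.length).filter
          (fun i => ((x :: xs).getD i ((0 : Int), (0 : Int))).2
            != ((x :: xs).getD (i - 1) ((0 : Int), (0 : Int))).2) = [] := by
        rw [List.filter_eq_nil_iff]
        intro i hi
        rw [List.mem_range'_1] at hi
        have e1 := hidx_run i (by omega)
        have e2 := hidx_run (i - 1) (by omega)
        simp only [bne_iff_ne, ne_eq, not_not]
        rw [e1, e2]
      rw [hf1, List.nil_append]
      cases rest with
      | nil =>
        have hxr : run = xs := by simpa using hx
        subst hxr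
        simp [groupRuns, List.take_of_length_le]
      | cons y ys =>
        have hy : y.2 ≠ x.2 := by
          have h := span_snd x.2 xs y ys
          rw [hspan] at h
          exact h rfl
        simp only [List.length_cons]
        rw [List.range'_succ]
        have e1 : (x :: xs).getD (1 + run.length) ((0 : Int), (0 : Int)) = y := by
          have h0 := hidx_rest 0
          have ha : run.length + 1 + 0 = 1 + run.length := by omega
          rw [ha] at h0
          simpa using h0
        have e2 : ((x :: xs).getD (1 + run.length - 1) ((0 : Int), (0 : Int))).2 = x.2 := by
          have ha : 1 + run.length - 1 = run.length := by omega
          rw [ha]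
          exact hidx_run run.length le_rfl
        rw [List.filter_cons_of_pos (by simp only [e1, e2, bne_iff_ne, ne_eq]; exact hy)]
        have hmap := (List.map_add_range' (a := 1 + run.length) (s := 1) (n := ys.length)
          (step := 1)).symm
        rw [hmap, List.filter_map]
        have hcong : List.filter
            ((fun i => ((x :: xs).getD i ((0 : Int), (0 : Int))).2
              != ((x :: xs).getD (i - 1) ((0 : Int), (0 : Int))).2)
              ∘ (fun z => (1 + run.length) + z)) (List.range' 1 ys.length)
            = List.filter (fun i => ((y :: ys).getD i ((0 : Int), (0 : Int))).2
              != ((y :: ys).getD (i - 1) ((0 : Int), (0 : Int))).2) (List.range' 1 ys.length) := by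
          apply List.filter_congr
          intro j hj
          rw [List.mem_range'_1] at hj
          have a1 : (1 + run.length) + j = run.length + 1 + j := by omega
          simp only [Function.comp_apply]
          rw [a1]
          have a2 : run.length + 1 + j - 1 = run.length + 1 + (j - 1) := by omega
          rw [a2, hidx_rest j, hidx_rest (j - 1)]
        rw [hcong]
        have hhead : List.take (1 + run.length - 0) (List.drop 0 (x :: xs)) = x :: run := by
          simp only [List.drop_zero, Nat.sub_zero]
          have ha : 1 + run.length = run.length + 1 := by omega
          rw [ha, List.take_succ_cons, ← hx, List.take_left]
        have e3 : (1 + run.length) :: (List.filter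
              (fun i => ((y :: ys).getD i ((0 : Int), (0 : Int))).2
                != ((y :: ys).getD (i - 1) ((0 : Int), (0 : Int))).2)
              (List.range' 1 ys.length)).map (fun z => (1 + run.length) + z)
            = ((0 : Nat) :: List.filter
              (fun i => ((y :: ys).getD i ((0 : Int), (0 : Int))).2
                != ((y :: ys).getD (i - 1) ((0 : Int), (0 : Int))).2)
              (List.range' 1 ys.length)).map (fun z => (1 + run.length) + z) := by
          simp
        have e4 : (List.filter
              (fun i => ((y :: ys).getD i ((0 : Int), (0 : Int))).2
                != ((y :: ys).getD (i - 1) ((0 : Int), (0 : Int))).2)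
              (List.range' 1 ys.length)).map (fun z => (1 + run.length) + z)
              ++ [run.length + (ys.length + 1) + 1]
            = ((List.filter
              (fun i => ((y :: ys).getD i ((0 : Int), (0 : Int))).2
                != ((y :: ys).getD (i - 1) ((0 : Int), (0 : Int))).2)
              (List.range' 1 ys.length)) ++ [ys.length + 1]).map
                (fun z => (1 + run.length) + z) := by
          have hnum : run.length + (ys.length + 1) + 1
              = (1 + run.length) + (ys.length + 1) := by omega
          rw [hnum, List.map_append]
          simp
        simp only [List.cons_append, List.zip_cons_cons, List.map_cons]
        rw [hhead]
        rw [e3, e4, slice_shift x run (y :: ys) xs hx]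
        have htail : (((0 : Nat) :: List.filter
              (fun i => ((y :: ys).getD i ((0 : Int), (0 : Int))).2
                != ((y :: ys).getD (i - 1) ((0 : Int), (0 : Int))).2)
              (List.range' 1 ys.length)).zip
              ((List.filter
              (fun i => ((y :: ys).getD i ((0 : Int), (0 : Int))).2
                != ((y :: ys).getD (i - 1) ((0 : Int), (0 : Int))).2)
              (List.range' 1 ys.length)) ++ [ys.length + 1])).map
              (fun p => List.take (p.2 - p.1) (List.drop p.1 (y :: ys)))
            = groupify_same_scores_alt (y :: ys) := by
          simp only [groupify_same_scores_alt, List.length_cons]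
          rw [if_neg (Nat.succ_ne_zero _)]
          simp only [Nat.add_sub_cancel]
        rw [htail, ih _ (by
          have h1 : (y :: ys).length ≤ xs.length := hxs ▸ Nat.le_add_left _ _
          have h2 : xs.length + 1 ≤ N + 1 := by simpa using hlen
          omega)]

theorem B_eq_groupRuns (rl : List (Int × Int)) : groupify_same_scores_alt rl = groupRuns rl :=
  B_eq_groupRuns_bounded rl.length rl le_rfl

-- ===== VERDICT (by name: the statement is the Claim_ definition above) =====
theorem groupify_same_scores_spec : Claim_equal_groupify_same_scores := by
  intro rank_list _
  unfold Spec_groupify_same_scores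
  rw [A_eq_groupRuns, B_eq_groupRuns]
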